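-- pv_equiv track=rewrite | github.com/KimJinSuAI/CodingTestPractice | 프로그래머스/Level3/멀리 뛰기.py | solution
-- ===== SOURCE A (Python) =====
-- import math
--
-- def solution(n):
--     one = n
--     two = 0
--     answer = 0
--     for i in range(n):
--         if one<0:
--             break
--         answer += math.factorial(one+two)//math.factorial(one)//math.factorial(two)
--         answer %=1234567
--         one-=2
--         two+=1
--     return answer % 1234567
-- ===== SOURCE B (Python) =====
-- def solution(n):
--     if n <= 0:
--         return 0
--     a, b = 0, 1
--     for _ in range(n + 1):
--         a, b = b, (a + b) % 1234567
--     return a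
-- ===== Notes on version B (the rewrite author's own statement) =====
-- stated objective: faster
-- what changed: Replaces the per-term big-integer factorial/binomial summation with an iterative two-variable Fibonacci recurrence carried modulo 1234567 (the diagonal binomial sum equals Fibonacci(n+1)).
import Mathlib
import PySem

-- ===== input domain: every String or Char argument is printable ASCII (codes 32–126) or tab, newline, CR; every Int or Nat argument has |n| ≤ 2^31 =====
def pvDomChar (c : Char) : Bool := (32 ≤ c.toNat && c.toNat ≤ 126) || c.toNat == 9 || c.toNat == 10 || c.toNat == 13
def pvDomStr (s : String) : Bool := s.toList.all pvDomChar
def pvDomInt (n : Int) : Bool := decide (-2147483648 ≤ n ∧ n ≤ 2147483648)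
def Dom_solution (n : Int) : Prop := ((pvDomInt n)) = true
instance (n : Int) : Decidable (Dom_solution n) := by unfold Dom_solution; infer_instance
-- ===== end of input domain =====

-- B replaces A's per-term factorial binomial summation by an O(n) iterative
-- Fibonacci recurrence mod 1234567 (the diagonal binomial sum is Fibonacci(n+1)).

-- ===== PORT A =====
-- math.factorial: Python raises ValueError on negative input; A only calls it on
-- nonnegative arguments (one ≥ 0, two ≥ 0 hold whenever the call is reached).
def pyFact (z : Int) : Int := (Nat.factorial z.toNat : Int)

-- the body of A's `for i in range(n)` loop; fuel = number of remaining iterations;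
-- the `if one<0: break` is the early return of `ans`.
def solLoopA : Nat → Int → Int → Int → Int
  | 0, _, _, ans => ans
  | fuel + 1, one, two, ans =>
    if one < 0 then ans
    else solLoopA fuel (one - 2) (two + 1)
      (PySem.Int.mod
        (ans + PySem.Int.floordiv (PySem.Int.floordiv (pyFact (one + two)) (pyFact one)) (pyFact two))
        1234567)

def solution (n : Int) : Int :=
  PySem.Int.mod (solLoopA n.toNat n 0 0) 1234567

-- ===== PORT B =====
-- `for _ in range(n + 1): a, b = b, (a + b) % 1234567`
def solLoopB : Nat → Int × Int → Int × Int
  | 0, ab => ab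
  | k + 1, (a, b) => solLoopB k (b, PySem.Int.mod (a + b) 1234567)

def solution_alt (n : Int) : Int :=
  if n ≤ 0 then 0
  else (solLoopB (n + 1).toNat (0, 1)).1

-- ===== PRECONDITION & SPEC =====
def Spec_solution (n : Int) (out : Int) : Prop := out = solution_alt n
instance (n : Int) (out : Int) : Decidable (Spec_solution n out) := by unfold Spec_solution; infer_instance

-- ===== CLAIM (what is proved, stated in full; the proofs are below) =====
def Claim_equal_solution : Prop := ∀ (n : Int), Dom_solution n → Spec_solution n (solution n)

-- ===== LEMMAS AND PROOFS =====

-- the exact sum A's loop accumulates (before the modulus)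
def diagSum (one two : Int) : Int :=
  if one < 0 then 0
  else (Nat.choose (one + two).toNat two.toNat : Int) + diagSum (one - 2) (two + 1)
termination_by (one + 2).toNat
decreasing_by omega

lemma diagSum_neg (one two : Int) (h : one < 0) : diagSum one two = 0 := by
  rw [diagSum, if_pos h]

lemma diagSum_step (one two : Int) (h : ¬ one < 0) :
    diagSum one two
      = (Nat.choose (one + two).toNat two.toNat : Int) + diagSum (one - 2) (two + 1) := by
  rw [diagSum, if_neg h]

lemma pyFact_natCast (m : Nat) : pyFact (m : Int) = (Nat.factorial m : Int) := by
  simp [pyFact]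

-- sequential floor division of factorials is the binomial coefficient
lemma fact_div_div (o t : Nat) :
    PySem.Int.floordiv (PySem.Int.floordiv (pyFact ((o : Int) + t)) (pyFact o)) (pyFact t)
      = (Nat.choose (o + t) t : Int) := by
  have h1 : ((o : Int) + t) = ((o + t : Nat) : Int) := by push_cast; ring
  rw [h1, pyFact_natCast, pyFact_natCast, pyFact_natCast]
  rw [PySem.Int.floordiv_natCast, PySem.Int.floordiv_natCast]
  norm_cast
  rw [Nat.div_div_eq_div_mul]
  exact (Nat.add_choose o t).symm

lemma mod_add_mod_left (a b : Int) :
    PySem.Int.mod (PySem.Int.mod a 1234567 + b) 1234567 = PySem.Int.mod (a + b) 1234567 := by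
  simp only [PySem.Int.mod_eq_emod_of_pos (show (0:Int) < 1234567 by norm_num)]
  exact Int.emod_add_emod a 1234567 b

-- A's loop, taken mod 1234567, computes the diagonal sum
lemma solLoopA_mod : ∀ (fuel : Nat) (one two ans : Int), 0 ≤ two → one < 2 * fuel →
    PySem.Int.mod (solLoopA fuel one two ans) 1234567
      = PySem.Int.mod (ans + diagSum one two) 1234567 := by
  intro fuel
  induction fuel with
  | zero =>
    intro one two ans _ h
    have h0 : one < 0 := by omega
    rw [solLoopA, diagSum_neg _ _ h0, add_zero]
  | succ k ih =>
    intro one two ans ht h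
    rw [solLoopA]
    by_cases h0 : one < 0
    · rw [if_pos h0, diagSum_neg _ _ h0, add_zero]
    · rw [if_neg h0]
      rw [ih _ _ _ (by omega) (by omega)]
      rw [mod_add_mod_left]
      rw [diagSum_step _ _ h0]
      congr 1
      have ho : ((one.toNat : Int)) = one := by omega
      have htt : ((two.toNat : Int)) = two := by omega
      have hd := fact_div_div one.toNat two.toNat
      rw [ho, htt] at hd
      rw [hd]
      have hc : (one + two).toNat = one.toNat + two.toNat := by omega
      rw [hc]
      ring

-- the diagonal sum over the naturals, as a range sum (the extra terms vanish)
lemma diagSum_nat : ∀ o t : Nat,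
    diagSum o t = ((Finset.range (o + 1)).sum (fun j => Nat.choose (o + t - j) (t + j)) : Int) := by
  intro o
  induction o using Nat.strong_induction_on with
  | _ o ih =>
    intro t
    match o, ih with
    | 0, _ =>
      rw [diagSum_step _ _ (by norm_num)]
      rw [diagSum_neg _ _ (by norm_num)]
      simp
    | 1, _ =>
      rw [diagSum_step _ _ (by norm_num)]
      rw [diagSum_neg _ _ (by norm_num)]
      have h1 : ((1 : Int) + (t : Int)).toNat = 1 + t := by omega
      rw [Finset.sum_range_succ, Finset.sum_range_succ]
      simp [h1]
    | (m + 2), ih =>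
      rw [diagSum_step _ _ (by push_cast; omega)]
      have h2 : ((m + 2 : Nat) : Int) - 2 = (m : Int) := by push_cast; ring
      have h3 : ((m + 2 : Nat) : Int) + (t : Int) = ((m + 2 + t : Nat) : Int) := by push_cast; ring
      have h4 : ((t : Int) + 1) = ((t + 1 : Nat) : Int) := by push_cast; ring
      rw [h2, h3, h4, ih m (by omega) (t + 1)]
      norm_cast
      -- reindex: Σ_{j<m+1} C(m+(t+1)-j, (t+1)+j) = Σ_{1≤j<m+2} C(m+2+t-j, t+j)
      rw [Finset.sum_range_succ' (fun j => Nat.choose (m + 2 + t - j) (t + j)) (m + 2)]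
      rw [Finset.sum_range_succ (fun j => Nat.choose (m + 2 + t - (j + 1)) (t + (j + 1))) (m + 1)]
      have hz : Nat.choose (m + 2 + t - (m + 1 + 1)) (t + (m + 1 + 1)) = 0 :=
        Nat.choose_eq_zero_of_lt (by omega)
      rw [hz, add_zero]
      have hfix : ∀ j ∈ Finset.range (m + 1),
          Nat.choose (m + (t + 1) - j) (t + 1 + j) = Nat.choose (m + 2 + t - (j + 1)) (t + (j + 1)) := by
        intro j hj
        congr 1 <;> omega
      rw [Finset.sum_congr rfl hfix]
      have hc : Nat.choose (m + 2 + t - 0) (t + 0) = Nat.choose (m + 2 + t) t := by simp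
      rw [hc]
      ring

-- the range sum at t = 0 is Fibonacci
lemma diagSum_fib (o : Nat) : diagSum o 0 = (Nat.fib (o + 1) : Int) := by
  have h0 : ((0 : Nat) : Int) = (0 : Int) := rfl
  rw [← h0, diagSum_nat o 0]
  norm_cast
  rw [Nat.fib_succ_eq_sum_choose o,
      Finset.Nat.sum_antidiagonal_eq_sum_range_succ_mk (fun p => Nat.choose p.1 p.2) o]
  rw [← Finset.sum_range_reflect (fun k => Nat.choose k (o - k)) (o + 1)]
  apply Finset.sum_congr rfl
  intro j hj
  simp only [Finset.mem_range] at hj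
  have h1 : o + 0 - j = o - j := by omega
  have h2 : o + 1 - 1 - j = o - j := by omega
  have h3 : o - (o - j) = j := by omega
  simp only [h1, h2, h3, zero_add]

-- B's loop advances a Fibonacci pair mod 1234567
lemma solLoopB_fib : ∀ (k m : Nat),
    solLoopB k (PySem.Int.mod (Nat.fib m) 1234567, PySem.Int.mod (Nat.fib (m + 1)) 1234567)
      = (PySem.Int.mod (Nat.fib (m + k)) 1234567, PySem.Int.mod (Nat.fib (m + k + 1)) 1234567) := by
  intro k
  induction k with
  | zero => intro m; simp [solLoopB]
  | succ j ih =>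
    intro m
    rw [solLoopB]
    have hstep : PySem.Int.mod (PySem.Int.mod (Nat.fib m) 1234567 + PySem.Int.mod (Nat.fib (m + 1)) 1234567) 1234567
        = PySem.Int.mod (Nat.fib (m + 1 + 1)) 1234567 := by
      simp only [PySem.Int.mod_eq_emod_of_pos (show (0:Int) < 1234567 by norm_num)]
      have hf : ((Nat.fib (m + 1 + 1) : Int)) = (Nat.fib m : Int) + (Nat.fib (m + 1) : Int) := by
        push_cast [Nat.fib_add_two]
        ring
      rw [hf, ← Int.add_emod]
    rw [hstep, ih (m + 1)]
    simp only [show m + 1 + j = m + (j + 1) from by omega]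

lemma solution_alt_pos (n : Int) (hn : 1 ≤ n) :
    solution_alt n = PySem.Int.mod (Nat.fib (n.toNat + 1)) 1234567 := by
  rw [solution_alt, if_neg (by omega)]
  have h1 : (n + 1).toNat = n.toNat + 1 := by omega
  have h0 : ((0 : Int), (1 : Int))
      = (PySem.Int.mod (Nat.fib 0) 1234567, PySem.Int.mod (Nat.fib 1) 1234567) := by
    simp only [PySem.Int.mod_eq_emod_of_pos (show (0:Int) < 1234567 by norm_num)]
    decide
  rw [h1, h0, solLoopB_fib (n.toNat + 1) 0]
  simp

-- ===== VERDICT (by name: the statement is the Claim_ definition above) =====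
theorem solution_spec : Claim_equal_solution := by
  intro n _
  unfold Spec_solution
  by_cases hn : n ≤ 0
  · have h0 : n.toNat = 0 := by omega
    rw [solution, solution_alt, if_pos hn, h0, solLoopA]
    rfl
  · rw [not_le] at hn
    rw [solution_alt_pos n (by omega)]
    rw [solution]
    rw [solLoopA_mod n.toNat n 0 0 le_rfl (by omega)]
    rw [zero_add]
    have hcast : n = ((n.toNat : Nat) : Int) := by omega
    conv_lhs => rw [hcast]
    rw [diagSum_fib n.toNat]
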